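-- pv_equiv track=rewrite | github.com/GarrettGunnell/Advent-Of-Code-2020 | 20/main.py | orientations
-- ===== SOURCE A (Python) =====
-- from copy import deepcopy
--
-- def reverse_tile(tile):
--     for row in range(len(tile)):
--         tile[row] = tile[row][::-1]
--
-- def rotate(tile):
--     return list(zip(*tile[::-1]))
--
-- def orientations(tile):
--     origin = deepcopy(tile)
--     permutations = []
--     for _ in range(4):
--         origin = rotate(origin)
--         permutations.append(deepcopy(origin))
--
--     reverse_tile(origin)
--     for _ in range(4):
--         origin = rotate(origin)
--         permutations.append(deepcopy(origin))
--
--     return permutations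
-- ===== SOURCE B (Python) =====
-- def orientations(tile):
--     # Transpose once in each shape, then read every orientation off those two
--     # grids with constant-time row/column reversals (no repeated rotation).
--     cols = list(zip(*tile))          # columns of the tile
--     grid = list(zip(*cols))          # rows of the tile, as tuples
--
--     def flip_rows(x):
--         return x[::-1]
--
--     def flip_cols(x):
--         return [r[::-1] for r in x]
--
--     return [
--         flip_cols(cols),             # rotated 90 deg
--         flip_rows(flip_cols(grid)),  # rotated 180 deg
--         flip_rows(cols),             # rotated 270 deg
--         grid,                        # rotated 360 deg
--         flip_rows(flip_cols(cols)),  # mirrored, rotated 90 deg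
--         flip_rows(grid),             # mirrored, rotated 180 deg
--         cols,                        # mirrored, rotated 270 deg
--         flip_cols(grid),             # mirrored, rotated 360 deg
--     ]
-- ===== Notes on version B (the rewrite author's own statement) =====
-- stated objective: alternative
-- what changed: B transposes the tile once in each shape (cols = zip(*tile), grid = zip(*cols)) and reads each of the 8 orientations off those two grids with plain row/column reversals, instead of A's eight sequential zip-rotations with deepcopies.
import Mathlib
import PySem

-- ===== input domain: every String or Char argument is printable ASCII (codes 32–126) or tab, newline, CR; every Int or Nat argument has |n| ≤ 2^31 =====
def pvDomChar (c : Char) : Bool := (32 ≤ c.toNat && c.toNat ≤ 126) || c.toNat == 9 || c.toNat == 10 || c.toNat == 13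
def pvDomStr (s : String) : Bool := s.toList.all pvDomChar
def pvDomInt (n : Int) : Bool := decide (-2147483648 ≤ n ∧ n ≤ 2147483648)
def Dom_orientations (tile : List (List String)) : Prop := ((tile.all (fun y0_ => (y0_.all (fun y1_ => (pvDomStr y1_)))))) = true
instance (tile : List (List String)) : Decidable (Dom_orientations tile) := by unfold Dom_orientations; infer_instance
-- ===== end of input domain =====

-- B transposes the tile once in each shape and reads every orientation off those
-- two grids with row/column reversals, instead of eight sequential zip-rotations.

-- ===== PORT A =====
-- zip(*rows): columns up to the minimum row length (Python zip truncation)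
def pvMinLen (rows : List (List String)) : Nat :=
  match rows with
  | [] => 0
  | r :: rs => rs.foldl (fun a row => min a row.length) r.length

def pvZipStar (rows : List (List String)) : List (List String) :=
  (List.range (pvMinLen rows)).map (fun j => rows.map (fun row => row.getD j ""))

-- rotate(tile) = list(zip(*tile[::-1]))
def pvRotate (t : List (List String)) : List (List String) :=
  pvZipStar t.reverse

def orientations (tile : List (List String)) : List (List (List String)) :=
  let st1 := (List.range 4).foldl
    (fun (st : List (List String) × List (List (List String))) _ =>
      let o := pvRotate st.1
      (o, st.2 ++ [o])) (tile, [])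
  -- reverse_tile(origin): each row reversed in place
  let origin := st1.1.map List.reverse
  let st2 := (List.range 4).foldl
    (fun (st : List (List String) × List (List (List String))) _ =>
      let o := pvRotate st.1
      (o, st.2 ++ [o])) (origin, st1.2)
  st2.2

-- ===== PORT B =====
-- cols = list(zip(*tile)); grid = list(zip(*cols));
-- flip_rows(x) = x[::-1]; flip_cols(x) = [r[::-1] for r in x]
def orientations_alt (tile : List (List String)) : List (List (List String)) :=
  let cols := pvZipStar tile
  let grid := pvZipStar cols
  [ cols.map List.reverse,
    (grid.map List.reverse).reverse,
    cols.reverse,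
    grid,
    (cols.map List.reverse).reverse,
    grid.reverse,
    cols,
    grid.map List.reverse ]

-- ===== PRECONDITION & SPEC =====
def Spec_orientations (tile : List (List String)) (out : List (List (List String))) : Prop := out = orientations_alt tile
instance (tile : List (List String)) (out : List (List (List String))) : Decidable (Spec_orientations tile out) := by unfold Spec_orientations; infer_instance

-- ===== CLAIM (what is proved, stated in full; the proofs are below) =====
def Claim_equal_orientations : Prop := ∀ (tile : List (List String)), Dom_orientations tile → Spec_orientations tile (orientations tile)

-- ===== LEMMAS AND PROOFS =====

-- matrix given by an index function
def pvM (f : Nat → Nat → String) (r c : Nat) : List (List String) :=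
  (List.range r).map (fun i => (List.range c).map (fun j => f i j))

theorem pvM_congr {f g : Nat → Nat → String} {r c : Nat}
    (h : ∀ i < r, ∀ j < c, f i j = g i j) : pvM f r c = pvM g r c := by
  unfold pvM
  refine List.map_congr_left (fun i hi => ?_)
  refine List.map_congr_left (fun j hj => ?_)
  exact h i (List.mem_range.mp hi) j (List.mem_range.mp hj)

theorem lt_foldl_min {l : List (List String)} {a x : Nat} :
    x < l.foldl (fun a row => min a row.length) a ↔ x < a ∧ ∀ y ∈ l, x < y.length := by
  induction l generalizing a with
  | nil => simp
  | cons b t ih =>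
    simp [List.foldl_cons, ih]
    tauto

theorem lt_pvMinLen_iff {rows : List (List String)} {x : Nat} :
    x < pvMinLen rows ↔ rows ≠ [] ∧ ∀ row ∈ rows, x < row.length := by
  cases rows with
  | nil => simp [pvMinLen]
  | cons r rs =>
    show x < List.foldl (fun a row => min a row.length) r.length rs ↔ _
    rw [lt_foldl_min]
    constructor
    · rintro ⟨h1, h2⟩
      refine ⟨by simp, ?_⟩
      intro row hrow
      rcases List.mem_cons.mp hrow with h | h
      · subst h; exact h1
      · exact h2 row h
    · rintro ⟨-, h⟩
      exact ⟨h r List.mem_cons_self, fun row hrow => h row (List.mem_cons_of_mem _ hrow)⟩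

theorem nat_eq_of_lt_iff {a b : Nat} (h : ∀ x, x < a ↔ x < b) : a = b := by
  rcases Nat.lt_trichotomy a b with hlt | heq | hgt
  · exact absurd ((h a).mpr hlt) (lt_irrefl _)
  · exact heq
  · exact absurd ((h b).mp hgt) (lt_irrefl _)

theorem pvMinLen_reverse (rows : List (List String)) :
    pvMinLen rows.reverse = pvMinLen rows := by
  refine nat_eq_of_lt_iff (fun x => ?_)
  simp [lt_pvMinLen_iff]

theorem pvMinLen_pvM (f : Nat → Nat → String) (r c : Nat) (hr : 0 < r) :
    pvMinLen (pvM f r c) = c := by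
  refine nat_eq_of_lt_iff (fun x => ?_)
  rw [lt_pvMinLen_iff]
  constructor
  · rintro ⟨hne, hall⟩
    have hm : ((List.range c).map (fun j => f 0 j)) ∈ pvM f r c := by
      unfold pvM
      exact List.mem_map.mpr ⟨0, List.mem_range.mpr hr, rfl⟩
    have := hall _ hm
    simpa using this
  · intro hx
    refine ⟨?_, ?_⟩
    · intro hnil
      have := congrArg List.length hnil
      simp [pvM] at this
      omega
    · intro row hrow
      unfold pvM at hrow
      rcases List.mem_map.mp hrow with ⟨i, _, rfl⟩
      simpa using hx

theorem getD_range_map {α : Type} (s : Nat → α) (c j : Nat) (d : α) (hj : j < c) :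
    ((List.range c).map s).getD j d = s j := by
  rw [List.getD_eq_getElem _ _ (by simpa using hj)]
  simp

theorem pvM_reverse (f : Nat → Nat → String) (r c : Nat) :
    (pvM f r c).reverse = pvM (fun i j => f (r-1-i) j) r c := by
  apply List.ext_getElem
  · simp [pvM]
  · intro i h1 h2
    have hr : i < r := by simpa [pvM] using h2
    simp [pvM, List.getElem_reverse]

theorem pvZipStar_pvM (f : Nat → Nat → String) (r c : Nat) (hr : 0 < r) :
    pvZipStar (pvM f r c) = pvM (fun j i => f i j) c r := by
  unfold pvZipStar
  rw [pvMinLen_pvM f r c hr]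
  refine List.map_congr_left (fun j hj => ?_)
  have hjc : j < c := List.mem_range.mp hj
  unfold pvM
  rw [List.map_map]
  refine List.map_congr_left (fun i _ => ?_)
  exact getD_range_map (fun k => f i k) c j "" hjc

theorem pvRotate_pvM (f : Nat → Nat → String) (r c : Nat) (hr : 0 < r) :
    pvRotate (pvM f r c) = pvM (fun j i => f (r-1-i) j) c r := by
  unfold pvRotate
  rw [pvM_reverse, pvZipStar_pvM _ r c hr]

theorem pvM_map_reverse (f : Nat → Nat → String) (r c : Nat) :
    (pvM f r c).map List.reverse = pvM (fun i j => f i (c-1-j)) r c := by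
  apply List.ext_getElem
  · simp [pvM]
  · intro i h1 h2
    have hr : i < r := by simpa [pvM] using h2
    simp [pvM]
    apply List.ext_getElem
    · simp
    · intro j _ hj2
      simp [List.getElem_reverse]

theorem pvZipStar_start (tile : List (List String)) :
    pvZipStar tile =
      pvM (fun j i => (tile.getD i []).getD j "") (pvMinLen tile) tile.length := by
  unfold pvZipStar pvM
  refine List.map_congr_left (fun j hjm => ?_)
  have hj : j < pvMinLen tile := List.mem_range.mp hjm
  apply List.ext_getElem
  · simp
  · intro i h1 h2
    have hi : i < tile.length := by simpa using h1
    have hjr : j < (tile[i]'hi).length :=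
      (lt_pvMinLen_iff.mp hj).2 _ (List.getElem_mem hi)
    simp [hi, hjr]

theorem pvRotate_start (tile : List (List String)) :
    pvRotate tile =
      pvM (fun j i => (tile.getD (tile.length - 1 - i) []).getD j "") (pvMinLen tile) tile.length := by
  unfold pvRotate
  rw [pvZipStar_start tile.reverse, pvMinLen_reverse]
  simp only [List.length_reverse]
  refine pvM_congr fun j hj i hi => ?_
  have : tile.reverse.getD i [] = tile.getD (tile.length - 1 - i) [] := by
    rw [List.getD_eq_getElem _ _ (by simpa using hi),
        List.getD_eq_getElem _ _ (by omega : tile.length - 1 - i < tile.length),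
        List.getElem_reverse]
  rw [this]

theorem orientations_unfold (tile : List (List String)) :
    orientations tile =
      (let r1 := pvRotate tile
       let r2 := pvRotate r1
       let r3 := pvRotate r2
       let r4 := pvRotate r3
       let s0 := r4.map List.reverse
       let s1 := pvRotate s0
       let s2 := pvRotate s1
       let s3 := pvRotate s2
       let s4 := pvRotate s3
       [r1, r2, r3, r4, s1, s2, s3, s4]) := by
  simp only [orientations, List.range_succ, List.range_zero, List.nil_append,
    List.foldl_cons, List.foldl_nil, List.foldl_append]
  rfl

theorem pvMinLen_nil_lt {tile : List (List String)} (h : 0 < pvMinLen tile) :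
    0 < tile.length := by
  cases tile with
  | nil => simp [pvMinLen] at h
  | cons r rs => simp

theorem orientations_eq_alt (tile : List (List String)) :
    orientations tile = orientations_alt tile := by
  rw [orientations_unfold]
  simp only [orientations_alt]
  by_cases h0 : pvMinLen tile = 0
  · have hc : pvZipStar tile = [] := by
      unfold pvZipStar; rw [h0]; simp
    have hr : pvRotate tile = [] := by
      unfold pvRotate pvZipStar; rw [pvMinLen_reverse, h0]; simp
    have hnil : pvRotate ([] : List (List String)) = [] := rfl
    have hz : pvZipStar ([] : List (List String)) = [] := rfl
    simp [hc, hz, hr, hnil]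
  · have hm : 0 < pvMinLen tile := Nat.pos_of_ne_zero h0
    have hn : 0 < tile.length := pvMinLen_nil_lt hm
    rw [pvRotate_start tile, pvRotate_pvM _ _ _ hm, pvRotate_pvM _ _ _ hn,
      pvRotate_pvM _ _ _ hm, pvM_map_reverse, pvRotate_pvM _ _ _ hn,
      pvRotate_pvM _ _ _ hm, pvRotate_pvM _ _ _ hn, pvRotate_pvM _ _ _ hm,
      pvZipStar_start tile, pvZipStar_pvM _ _ _ hm]
    simp only [pvM_map_reverse, pvM_reverse]
    simp only [List.cons.injEq, and_true]
    refine ⟨?_, ?_, ?_, ?_, ?_, ?_, ?_, ?_⟩ <;>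
      first
      | trivial
      | · refine pvM_congr fun a ha b hb => ?_
          show (tile.getD _ []).getD _ "" = (tile.getD _ []).getD _ ""
          congr 3 <;> omega

-- ===== VERDICT (by name: the statement is the Claim_ definition above) =====
theorem orientations_spec : Claim_equal_orientations := by
  intro tile _
  unfold Spec_orientations
  exact orientations_eq_alt tile
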